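-- pv_equiv track=rewrite | github.com/daniel-reich/ubiquitous-fiesta | djJpmZPPBx3JaAqcK_19.py | maya_number
-- ===== SOURCE A (Python) =====
-- def maya_number(n):
--   digits = ["@", "o", "oo", "ooo", "oooo", "-", "o-", "oo-", "ooo-", "o o o o -",
--           "--","o--", "oo--", "ooo--", "oooo--",
--           "---", "o---", "oo---", "ooo---","oooo---"]
--   ret = []
--   if n == 0: return ["@"]
--   while n > 0:
--     ret.append(digits[n % 20])
--     n = n // 20
--   return ret[::-1]
-- ===== SOURCE B (Python) =====
-- def maya_number(n):
--   digits = ["@", "o", "oo", "ooo", "oooo", "-", "o-", "oo-", "ooo-", "o o o o -",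
--           "--","o--", "oo--", "ooo--", "oooo--",
--           "---", "o---", "oo---", "ooo---","oooo---"]
--   if n == 0:
--     return ["@"]
--   if n < 0:
--     return []
--   # find the largest power of 20 not exceeding n, then emit digits
--   # most-significant-first by dividing by descending powers of 20.
--   p = 1
--   while p * 20 <= n:
--     p *= 20
--   out = []
--   while p >= 1:
--     out.append(digits[(n // p) % 20])
--     p //= 20
--   return out
-- ===== Notes on version B (the rewrite author's own statement) =====
-- stated objective: alternative
-- what changed: Instead of collecting remainders least-significant-first and reversing, B first finds the largest power of 20 not exceeding n and then emits digits most-significant-first by dividing by descending powers of 20.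
import Mathlib
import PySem

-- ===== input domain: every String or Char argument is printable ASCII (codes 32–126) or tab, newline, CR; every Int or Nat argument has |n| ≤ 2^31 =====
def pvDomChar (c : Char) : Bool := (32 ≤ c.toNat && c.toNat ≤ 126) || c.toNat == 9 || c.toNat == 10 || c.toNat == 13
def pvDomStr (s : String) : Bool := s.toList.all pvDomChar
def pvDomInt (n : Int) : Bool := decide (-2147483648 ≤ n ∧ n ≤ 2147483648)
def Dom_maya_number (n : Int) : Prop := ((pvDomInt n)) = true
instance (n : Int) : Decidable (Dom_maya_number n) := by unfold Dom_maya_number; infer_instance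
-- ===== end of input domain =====

-- B finds the largest power of 20 ≤ n and emits digits most-significant-first by dividing by descending powers, instead of A's append-then-reverse remainder loop; same values, same cost.


def mayaDigits : List String := ["@", "o", "oo", "ooo", "oooo", "-", "o-", "oo-", "ooo-", "o o o o -",
          "--","o--", "oo--", "ooo--", "oooo--",
          "---", "o---", "oo---", "ooo---","oooo---"]

-- digits[i] (always in range where the programs use it, so getD "" is exact)
def mayaD (i : Int) : String := (PySem.List.pyGet? mayaDigits i).getD ""

-- ===== PORT A =====
-- A's while loop: appends digits[n % 20], then n = n // 20
def mayaLoop (n : Int) (ret : List String) : List String :=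
  if _h : n > 0 then
    mayaLoop (PySem.Int.floordiv n 20) (ret ++ [mayaD (PySem.Int.mod n 20)])
  else ret
termination_by n.toNat
decreasing_by
  have h1 : PySem.Int.floordiv n 20 = n / 20 := PySem.Int.floordiv_eq_ediv_of_pos (by omega)
  rw [h1]; omega

def maya_number (n : Int) : List String :=
  if n = 0 then ["@"]
  else (mayaLoop n []).reverse

-- ===== PORT B =====
-- B's first loop: while p*20 <= n: p *= 20.  The '0 < p' conjunct is a totality
-- guard only (B always calls it with p = 1, where it never fails).
def mayaPowLoop (n p : Int) : Int :=
  if _h : 0 < p ∧ p * 20 ≤ n then mayaPowLoop n (p * 20) else p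
termination_by (n - p).toNat
decreasing_by omega

-- B's second loop: while p >= 1: out.append(digits[(n // p) % 20]); p //= 20
def mayaEmitLoop (n p : Int) (out : List String) : List String :=
  if _h : p ≥ 1 then
    mayaEmitLoop n (PySem.Int.floordiv p 20)
      (out ++ [mayaD (PySem.Int.mod (PySem.Int.floordiv n p) 20)])
  else out
termination_by p.toNat
decreasing_by
  have h1 : PySem.Int.floordiv p 20 = p / 20 := PySem.Int.floordiv_eq_ediv_of_pos (by omega)
  rw [h1]; omega

def maya_number_alt (n : Int) : List String :=
  if n = 0 then ["@"]
  else if n < 0 then []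
  else mayaEmitLoop n (mayaPowLoop n 1) []

-- ===== PRECONDITION & SPEC =====
def Spec_maya_number (n : Int) (out : List String) : Prop := out = maya_number_alt n
instance (n : Int) (out : List String) : Decidable (Spec_maya_number n out) := by unfold Spec_maya_number; infer_instance

-- ===== CLAIM (what is proved, stated in full; the proofs are below) =====
def Claim_equal_maya_number : Prop := ∀ (n : Int), Dom_maya_number n → Spec_maya_number n (maya_number n)

-- ===== LEMMAS AND PROOFS =====

-- proof-side pure form of A's loop (most-significant digit first)
def mrec (n : Int) : List String :=
  if _h : n ≤ 0 then [] else mrec (n / 20) ++ [mayaD (n % 20)]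
termination_by n.toNat
decreasing_by omega

-- proof-side pure form of B's emit loop
def epure (n p : Int) : List String :=
  if _h : 1 ≤ p then mayaD ((n / p) % 20) :: epure n (p / 20) else []
termination_by p.toNat
decreasing_by omega

-- the last j base-20 digits of n, most-significant first
def padrec (n : Int) : Nat → List String
  | 0 => []
  | j + 1 => padrec (n / 20) j ++ [mayaD (n % 20)]

theorem mayaLoop_eq (n : Int) (acc : List String) :
    mayaLoop n acc = acc ++ (mrec n).reverse := by
  by_cases h : n > 0
  · rw [mayaLoop, dif_pos h, mrec, dif_neg (by omega),
      PySem.Int.floordiv_eq_ediv_of_pos (by omega), PySem.Int.mod_eq_emod_of_pos (by omega),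
      mayaLoop_eq (n / 20)]
    simp
  · rw [mayaLoop, dif_neg h, mrec, dif_pos (by omega)]
    simp
termination_by n.toNat
decreasing_by omega

theorem mayaEmitLoop_eq (n p : Int) (out : List String) :
    mayaEmitLoop n p out = out ++ epure n p := by
  by_cases h : p ≥ 1
  · rw [mayaEmitLoop, dif_pos h, epure, dif_pos h,
      PySem.Int.floordiv_eq_ediv_of_pos (show (0:Int) < 20 by omega),
      PySem.Int.floordiv_eq_ediv_of_pos (show (0:Int) < p by omega),
      PySem.Int.mod_eq_emod_of_pos (show (0:Int) < 20 by omega),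
      mayaEmitLoop_eq n (p / 20)]
    simp
  · rw [mayaEmitLoop, dif_neg h, epure, dif_neg h]
    simp
termination_by p.toNat
decreasing_by omega

theorem mayaPowLoop_spec (n p : Int) (hp : 0 < p) (hpn : p ≤ n) :
    ∃ k : Nat, mayaPowLoop n p = p * 20 ^ k ∧ p * 20 ^ k ≤ n ∧ n < p * 20 ^ (k + 1) := by
  by_cases h : p * 20 ≤ n
  · obtain ⟨k, hk1, hk2, hk3⟩ := mayaPowLoop_spec n (p * 20) (by omega) h
    refine ⟨k + 1, ?_, ?_, ?_⟩
    · rw [mayaPowLoop, dif_pos ⟨hp, h⟩, hk1]; ring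
    · calc p * 20 ^ (k + 1) = p * 20 * 20 ^ k := by ring
        _ ≤ n := hk2
    · calc n < p * 20 * 20 ^ (k + 1) := hk3
        _ = p * 20 ^ (k + 1 + 1) := by ring
  · exact ⟨0, by rw [mayaPowLoop, dif_neg (by tauto)]; simp, by simpa using hpn, by simpa using not_le.mp h⟩
termination_by (n - p).toNat
decreasing_by omega

theorem padrec_shift (j : Nat) : ∀ n : Int, padrec n (j + 1) = mayaD ((n / 20 ^ j) % 20) :: padrec n j := by
  induction j with
  | zero => intro n; simp [padrec]
  | succ j ih =>
      intro n
      show padrec (n / 20) (j + 1) ++ [mayaD (n % 20)] = _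
      rw [ih (n / 20)]
      have : n / 20 / 20 ^ j = n / 20 ^ (j + 1) := by
        rw [Int.ediv_ediv_of_nonneg (by norm_num : (0:Int) ≤ 20), pow_succ, mul_comm]
      rw [this]
      simp [padrec]

theorem epure_pow (k : Nat) : ∀ n : Int, epure n (20 ^ k) = padrec n (k + 1) := by
  induction k with
  | zero =>
      intro n
      rw [epure, dif_pos (by norm_num)]
      rw [epure, dif_neg (by norm_num)]
      simp [padrec]
  | succ k ih =>
      intro n
      rw [epure, dif_pos (show (1:Int) ≤ 20 ^ (k+1) from one_le_pow₀ (by norm_num))]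
      have h20 : (20:Int) ^ (k + 1) / 20 = 20 ^ k := by
        rw [pow_succ]; exact Int.mul_ediv_cancel _ (by norm_num)
      rw [h20, ih n, padrec_shift (k + 1) n, pow_succ, mul_comm]

theorem mrec_eq_padrec (k : Nat) : ∀ n : Int, 20 ^ k ≤ n → n < 20 ^ (k + 1) →
    mrec n = padrec n (k + 1) := by
  induction k with
  | zero =>
      intro n h1 h2
      simp only [pow_zero] at h1 h2
      rw [mrec, dif_neg (by omega)]
      have : n / 20 = 0 := Int.ediv_eq_zero_of_lt (by omega) h2
      rw [this, mrec, dif_pos (by omega)]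
      simp [padrec]
  | succ k ih =>
      intro n h1 h2
      have hn : 0 < n := lt_of_lt_of_le (by positivity) h1
      rw [mrec, dif_neg (by omega)]
      have hl : 20 ^ k ≤ n / 20 := by
        rw [Int.le_ediv_iff_mul_le (by norm_num)]
        calc 20 ^ k * 20 = 20 ^ (k + 1) := (pow_succ 20 k).symm
          _ ≤ n := h1
      have hu : n / 20 < 20 ^ (k + 1) := by
        rw [Int.ediv_lt_iff_lt_mul (by norm_num)]
        calc n < 20 ^ (k + 1 + 1) := h2
          _ = 20 ^ (k + 1) * 20 := pow_succ 20 (k + 1)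
      rw [ih (n / 20) hl hu]
      rfl

-- ===== VERDICT (by name: the statement is the Claim_ definition above) =====
theorem maya_number_spec : Claim_equal_maya_number := by
  intro n _
  unfold Spec_maya_number maya_number maya_number_alt
  by_cases h0 : n = 0
  · simp [h0]
  · rw [if_neg h0, if_neg h0]
    by_cases hneg : n < 0
    · rw [if_pos hneg, mayaLoop, dif_neg (by omega)]
      simp
    · rw [if_neg hneg]
      have hn : 0 < n := by omega
      obtain ⟨k, hk1, hk2, hk3⟩ := mayaPowLoop_spec n 1 (by omega) (by omega)
      simp only [one_mul] at hk1 hk2 hk3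
      rw [mayaLoop_eq, mayaEmitLoop_eq, hk1, List.nil_append, List.nil_append,
        epure_pow, ← mrec_eq_padrec k n hk2 hk3]
      simp
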